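-- pv_equiv track=rewrite | github.com/Roronoah-sudo/nihongo-quest | minigames/listening_game.py | _generate_pitch_display
-- ===== SOURCE A (Python) =====
-- def _generate_pitch_display(romaji):
--     """Generate a simple pitch accent visualisation string."""
--     # Simple heuristic pitch pattern for display
--     vowels = set('aeiou')
--     morae = []
--     i = 0
--     while i < len(romaji):
--         if romaji[i] in vowels:
--             morae.append(romaji[i])
--             i += 1
--         elif i + 1 < len(romaji) and romaji[i + 1] in vowels:
--             morae.append(romaji[i:i + 2])
--             i += 2
--         else:
--             morae.append(romaji[i])
--             i += 1
--
--     if len(morae) <= 1: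
--         return ''
--     # Standard flat pattern with initial rise
--     accents = []
--     for j, m in enumerate(morae):
--         if j == 0:
--             accents.append(f'{m}')
--         elif j == 1:
--             accents.append(f'{m}')
--         else:
--             accents.append(f'{m}')
--     return '  '.join(accents)
-- ===== SOURCE B (Python) =====
-- import re
--
-- def _generate_pitch_display(romaji):
--     """Generate a simple pitch accent visualisation string."""
--     # One regex pass: a non-vowel followed by a vowel is one mora, otherwise any single char.
--     morae = re.findall(r'[^aeiou][aeiou]|[\s\S]', romaji)
--     return '' if len(morae) <= 1 else '  '.join(morae)
-- ===== Notes on version B (the rewrite author's own statement) =====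
-- stated objective: idiomatic
-- what changed: Replaces the index-based while-loop mora parser and the dead three-branch accent loop with a single regex findall tokenization (a non-vowel followed by a vowel, else any single character) and a direct join.
import Mathlib
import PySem

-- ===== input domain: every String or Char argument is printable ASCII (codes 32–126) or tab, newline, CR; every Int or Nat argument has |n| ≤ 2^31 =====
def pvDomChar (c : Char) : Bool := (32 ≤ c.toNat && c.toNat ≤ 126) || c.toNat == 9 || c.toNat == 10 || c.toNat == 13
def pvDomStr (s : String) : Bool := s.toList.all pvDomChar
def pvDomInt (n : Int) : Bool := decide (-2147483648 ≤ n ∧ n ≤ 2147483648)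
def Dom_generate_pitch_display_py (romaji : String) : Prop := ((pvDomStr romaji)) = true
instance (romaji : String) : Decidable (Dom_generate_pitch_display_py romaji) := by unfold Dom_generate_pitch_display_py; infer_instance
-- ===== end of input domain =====

-- B replaces A's index-based while loop and dead per-mora accent loop with a single regex-style
-- tokenization pass and a direct join (objective: idiomatic/simpler).


-- ===== PORT A =====
-- A's `vowels = set('aeiou')`
def pvVowelsA : PySem.Set Char := PySem.Set.ofList "aeiou".toList

-- A's while-loop over index i, transliterated as the obvious structural recursion on the
-- suffix romaji[i:]; branches in A's order (vowel / consonant+vowel / fallback).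
def pvMoraLoopA : List Char → List String
  | [] => []
  | c :: rest =>
    if c ∈ pvVowelsA then
      String.ofList [c] :: pvMoraLoopA rest
    else
      match rest with
      | d :: rest' =>
        if d ∈ pvVowelsA then String.ofList [c, d] :: pvMoraLoopA rest'
        else String.ofList [c] :: pvMoraLoopA (d :: rest')
      | [] => [String.ofList [c]]

def generate_pitch_display_py (romaji : String) : String :=
  let morae := pvMoraLoopA romaji.toList
  if morae.length ≤ 1 then ""
  else
    -- A's accent loop: for j, m in enumerate(morae): append m (all three branches append m)
    let accents := (PySem.List.enumerate morae).foldl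
      (fun acc jm => acc ++ [if jm.1 = 0 then jm.2 else if jm.1 = 1 then jm.2 else jm.2]) []
    PySem.Str.join "  " accents

-- ===== PORT B =====
-- B's regex tokenizer re.findall(r'[^aeiou][aeiou]|[\s\S]', romaji), ported by hand:
-- at each position the first alternative (non-vowel then vowel) is tried, else one char.
-- Exact: the pattern is anchored scanning left to right with no backtracking across matches.
def pvIsVowelB (c : Char) : Bool := c = 'a' || c = 'e' || c = 'i' || c = 'o' || c = 'u'

def pvTokB : List Char → List String
  | [] => []
  | [c] => [String.ofList [c]]
  | c :: d :: rest =>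
    if !pvIsVowelB c && pvIsVowelB d then String.ofList [c, d] :: pvTokB rest
    else String.ofList [c] :: pvTokB (d :: rest)

def generate_pitch_display_py_alt (romaji : String) : String :=
  let morae := pvTokB romaji.toList
  if morae.length ≤ 1 then "" else PySem.Str.join "  " morae

-- ===== PRECONDITION & SPEC =====
def Spec_generate_pitch_display_py (romaji : String) (out : String) : Prop := out = generate_pitch_display_py_alt romaji
instance (romaji : String) (out : String) : Decidable (Spec_generate_pitch_display_py romaji out) := by unfold Spec_generate_pitch_display_py; infer_instance

-- ===== CLAIM (what is proved, stated in full; the proofs are below) =====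
def Claim_equal_generate_pitch_display_py : Prop := ∀ (romaji : String), Dom_generate_pitch_display_py romaji → Spec_generate_pitch_display_py romaji (generate_pitch_display_py romaji)

-- ===== LEMMAS AND PROOFS =====

lemma pvTok_eq (cs : List Char) : pvMoraLoopA cs = pvTokB cs := by
  induction cs using pvTokB.induct <;>
    simp_all [pvMoraLoopA, pvTokB, pvVowelsA, pvIsVowelB, PySem.Set.mem_ofList] <;>
    aesop

-- ===== VERDICT (by name: the statement is the Claim_ definition above) =====
theorem generate_pitch_display_py_spec : Claim_equal_generate_pitch_display_py := by
  intro romaji _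
  unfold Spec_generate_pitch_display_py generate_pitch_display_py generate_pitch_display_py_alt
  rw [pvTok_eq]
  by_cases h : (pvTokB romaji.toList).length ≤ 1
  · simp [h]
  · simp only [h, if_neg, not_false_iff]
    congr 1
    rw [PySem.List.foldl_append_singleton_eq_map]
    simpa using PySem.List.map_snd_enumerate (pvTokB romaji.toList) 0
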